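-- pv_equiv track=rewrite | github.com/INSAVII/nadaeri_250629 | services/qname-service/product_name_processor_2020601.py | trim_product_name
-- ===== SOURCE A (Python) =====
-- def trim_product_name(product_name, min_len=25, max_len=35):
--     words = product_name.split()
--     result = ""
--     for word in words:
--         if len(result) + len(word) + (1 if result else 0) > max_len:
--             break
--         if result:
--             result += " "
--         result += word
--     if len(result) < min_len and len(words) > len(result.split()):
--         for word in words[len(result.split()):]:
--             if len(result) + len(word) + 1 > max_len:
--                 break
--             result += " " + word
--     return result
-- ===== SOURCE B (Python) =====
-- def trim_product_name(product_name, min_len=25, max_len=35):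
--     # Prefix-sum + binary search instead of A's running-accumulator scan:
--     # cum[i] is the joined length of the first i+1 words, which is strictly
--     # increasing, so the greedy prefix is the largest k with cum[k-1] <= max_len.
--     words = product_name.split()
--     cum = []  # cum[i] = len(" ".join(words[:i+1]))
--     total = 0
--     for w in words:
--         total += len(w) + (1 if cum else 0)
--         cum.append(total)
--     lo, hi = 0, len(words)  # invariant: words[:lo] fits, no prefix beyond hi fits
--     while lo < hi:
--         mid = (lo + hi + 1) // 2
--         if cum[mid - 1] <= max_len:
--             lo = mid
--         else:
--             hi = mid - 1
--     return " ".join(words[:lo])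
-- ===== Notes on version B (the rewrite author's own statement) =====
-- stated objective: alternative
-- what changed: Replaces A's running-accumulator word scan (plus its dead second repair loop) with a prefix-sum array of joined lengths and a binary search for the largest fitting prefix, then one join of that prefix.
import Mathlib
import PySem

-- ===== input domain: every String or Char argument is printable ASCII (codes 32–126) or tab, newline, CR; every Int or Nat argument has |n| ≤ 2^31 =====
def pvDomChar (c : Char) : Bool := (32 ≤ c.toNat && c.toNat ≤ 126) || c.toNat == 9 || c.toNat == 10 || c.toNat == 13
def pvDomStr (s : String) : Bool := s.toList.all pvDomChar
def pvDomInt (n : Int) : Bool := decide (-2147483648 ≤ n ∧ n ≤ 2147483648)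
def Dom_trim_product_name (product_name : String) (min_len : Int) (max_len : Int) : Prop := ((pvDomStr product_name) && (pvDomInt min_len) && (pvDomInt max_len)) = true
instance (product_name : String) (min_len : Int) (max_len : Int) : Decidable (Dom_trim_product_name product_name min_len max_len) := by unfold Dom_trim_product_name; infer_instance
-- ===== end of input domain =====

-- B replaces A's running-accumulator scan (and its dead second repair loop) by a prefix-sum
-- array of joined lengths plus a binary search for the largest fitting prefix (objective:
-- alternative decomposition, same exact return value).

-- ===== PORT A =====
-- first for-loop of A (greedy append with break)
def pvALoop1 (mx : Int) : List (List Char) → List Char → List Char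
  | [], res => res
  | w :: ws, res =>
    if (res.length : Int) + (w.length : Int) + (if res.isEmpty then 0 else 1) > mx then res
    else pvALoop1 mx ws ((if res.isEmpty then res else res ++ [' ']) ++ w)

-- second for-loop of A
def pvALoop2 (mx : Int) : List (List Char) → List Char → List Char
  | [], res => res
  | w :: ws, res =>
    if (res.length : Int) + (w.length : Int) + 1 > mx then res
    else pvALoop2 mx ws (res ++ ' ' :: w)

def trim_product_name (product_name : String) (min_len : Int) (max_len : Int) : String :=
  let words := PySem.Chars.split₀ product_name.toList          -- product_name.split()
  let result := pvALoop1 max_len words []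
  -- words[k:] with k = len(result.split()) ≥ 0 is List.drop k (exact for a nonnegative index)
  let result :=
    if (result.length : Int) < min_len ∧ (PySem.Chars.split₀ result).length < words.length then
      pvALoop2 max_len (words.drop (PySem.Chars.split₀ result).length) result
    else result
  String.mk result

-- ===== PORT B =====
-- while lo < hi: binary search; cum[mid-1] is always in range when called as below,
-- so pyGetD's default 0 is never used
def pvBSearch (cum : List Int) (mx : Int) (lo hi : Int) : Int :=
  if lo < hi then
    let mid := PySem.Int.floordiv (lo + hi + 1) 2
    if PySem.List.pyGetD cum (mid - 1) 0 ≤ mx then pvBSearch cum mx mid hi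
    else pvBSearch cum mx lo (mid - 1)
  else lo
termination_by (hi - lo).toNat
decreasing_by
  · have h := PySem.Int.floordiv_two_mid_bounds (lo := lo + 1) (hi := hi) (by omega)
    have e : lo + 1 + hi = lo + hi + 1 := by ring
    rw [e] at h
    omega
  · have h := PySem.Int.floordiv_two_mid_bounds (lo := lo + 1) (hi := hi) (by omega)
    have e : lo + 1 + hi = lo + hi + 1 := by ring
    rw [e] at h
    omega

def trim_product_name_alt (product_name : String) (min_len : Int) (max_len : Int) : String :=
  let words := PySem.Chars.split₀ product_name.toList          -- product_name.split()
  -- cum[i] = len(" ".join(words[:i+1])), built in one pass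
  let st := words.foldl (fun (st : List Int × Int) w =>
      let total := st.2 + (w.length : Int) + (if st.1.isEmpty then 0 else 1)
      (st.1 ++ [total], total)) ([], 0)
  let lo := pvBSearch st.1 max_len 0 (words.length : Int)
  -- words[:lo] with lo ≥ 0 is List.take lo.toNat (exact for a nonnegative bound)
  String.mk (PySem.Chars.join [' '] (words.take lo.toNat))

-- ===== PRECONDITION & SPEC =====
def Spec_trim_product_name (product_name : String) (min_len : Int) (max_len : Int) (out : String) : Prop := out = trim_product_name_alt product_name min_len max_len
instance (product_name : String) (min_len : Int) (max_len : Int) (out : String) : Decidable (Spec_trim_product_name product_name min_len max_len out) := by unfold Spec_trim_product_name; infer_instance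

-- ===== CLAIM (what is proved, stated in full; the proofs are below) =====
def Claim_equal_trim_product_name : Prop := ∀ (product_name : String) (min_len : Int) (max_len : Int), Dom_trim_product_name product_name min_len max_len → Spec_trim_product_name product_name min_len max_len (trim_product_name product_name min_len max_len)

-- ===== LEMMAS AND PROOFS =====

-- pvT L k = sum of (len+1) over the first k words = joined length of the first k words, plus 1
def pvT : List Nat → Nat → Nat
  | _, 0 => 0
  | [], _ + 1 => 0
  | l :: ls, k + 1 => l + 1 + pvT ls k

-- " " ++ w for each word, flattened: what the loops append after a nonempty result
def pvFlat (ws : List (List Char)) : List Char := (ws.map (' ' :: ·)).flatten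

-- abstract greedy count shared by both of A's loops (cur = current result length, nonempty case)
def pvCnt (mx : Int) : List (List Char) → Int → Nat
  | [], _ => 0
  | w :: ws, cur => if cur + (w.length : Int) + 1 > mx then 0
                    else pvCnt mx ws (cur + 1 + (w.length : Int)) + 1

-- the overall greedy prefix count of A
def pvK (mx : Int) : List (List Char) → Nat
  | [] => 0
  | w :: t => if (w.length : Int) > mx then 0 else pvCnt mx t (w.length : Int) + 1

theorem pvT_nil (k : Nat) : pvT [] k = 0 := by cases k <;> rfl

theorem pvT_zero (L : List Nat) : pvT L 0 = 0 := by cases L <;> rfl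

theorem pvT_succ (L : List Nat) (k : Nat) (h : k < L.length) :
    pvT L (k + 1) = pvT L k + L[k] + 1 := by
  induction L generalizing k with
  | nil => simp at h
  | cons l ls ih =>
    cases k with
    | zero => simp [pvT]
    | succ j =>
      simp only [pvT, List.getElem_cons_succ]
      have := ih j (by simpa using h)
      omega

theorem pvT_mono (L : List Nat) (k k' : Nat) (h : k ≤ k') : pvT L k ≤ pvT L k' := by
  induction L generalizing k k' with
  | nil => simp [pvT_nil]
  | cons l ls ih =>
    cases k with
    | zero => cases k' <;> simp [pvT]
    | succ j =>
      cases k' with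
      | zero => omega
      | succ j' => simpa [pvT] using ih j j' (by omega)

theorem pvFlat_nil : pvFlat [] = [] := rfl

theorem pvFlat_cons (w : List Char) (t : List (List Char)) :
    pvFlat (w :: t) = (' ' :: w) ++ pvFlat t := by simp [pvFlat]

theorem pvFlat_take_length (t : List (List Char)) (j : Nat) :
    (pvFlat (t.take j)).length = pvT (t.map List.length) j := by
  induction t generalizing j with
  | nil => simp [pvFlat_nil, pvT_nil]
  | cons w t ih =>
    cases j with
    | zero => simp [pvFlat_nil, pvT]
    | succ i => simp [pvFlat_cons, pvT, ih i]; omega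

theorem pvJoin_cons (w : List Char) (t : List (List Char)) :
    PySem.Chars.join [' '] (w :: t) = w ++ pvFlat t := by
  induction t generalizing w with
  | nil => simp [PySem.Chars.join_singleton, pvFlat_nil]
  | cons x t ih =>
    rw [PySem.Chars.join_cons_cons, ih x, pvFlat_cons]
    simp

-- A's second loop appends the greedy extension
theorem pvALoop2_eq (mx : Int) (ws : List (List Char)) : ∀ res : List Char,
    pvALoop2 mx ws res = res ++ pvFlat (ws.take (pvCnt mx ws (res.length : Int))) := by
  induction ws with
  | nil => intro res; simp [pvALoop2, pvCnt, pvFlat_nil]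
  | cons w t ih =>
    intro res
    by_cases h : (res.length : Int) + (w.length : Int) + 1 > mx
    · simp [pvALoop2, pvCnt, h, pvFlat_nil]
    · have e : ((res ++ ' ' :: w).length : Int) = (res.length : Int) + 1 + (w.length : Int) := by
        simp; omega
      simp only [pvALoop2, pvCnt, if_neg h, ih (res ++ ' ' :: w), e, List.take_succ_cons,
        pvFlat_cons]
      simp

-- A's first loop does the same once the accumulator is nonempty
theorem pvALoop1_eq (mx : Int) (ws : List (List Char)) : ∀ res : List Char, res ≠ [] →
    pvALoop1 mx ws res = res ++ pvFlat (ws.take (pvCnt mx ws (res.length : Int))) := by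
  induction ws with
  | nil => intro res _; simp [pvALoop1, pvCnt, pvFlat_nil]
  | cons w t ih =>
    intro res hres
    have hE : res.isEmpty = false := by simpa [List.isEmpty_iff] using hres
    by_cases h : (res.length : Int) + (w.length : Int) + 1 > mx
    · simp [pvALoop1, pvCnt, hE, h, pvFlat_nil]
    · have hne' : res ++ ' ' :: w ≠ [] := by simp
      have e : ((res ++ ' ' :: w).length : Int)
          = (res.length : Int) + 1 + (w.length : Int) := by simp; omega
      simp only [pvALoop1, hE, Bool.false_eq_true, if_false, if_neg h, List.append_assoc,
        List.singleton_append]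
      rw [ih _ hne', e]
      simp only [pvCnt, if_neg h, List.take_succ_cons, pvFlat_cons]
      simp

theorem pvCnt_le (mx : Int) (ws : List (List Char)) : ∀ cur, pvCnt mx ws cur ≤ ws.length := by
  induction ws with
  | nil => intro cur; simp [pvCnt]
  | cons w t ih =>
    intro cur
    by_cases h : cur + (w.length : Int) + 1 > mx
    · simp [pvCnt, h]
    · simp only [pvCnt, if_neg h, List.length_cons]
      have := ih (cur + 1 + (w.length : Int))
      omega

theorem pvCnt_fit (mx : Int) (ws : List (List Char)) : ∀ cur, cur ≤ mx →
    cur + (pvT (ws.map List.length) (pvCnt mx ws cur) : Int) ≤ mx := by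
  induction ws with
  | nil => intro cur h; simpa [pvCnt, pvT_nil] using h
  | cons w t ih =>
    intro cur hcur
    by_cases h : cur + (w.length : Int) + 1 > mx
    · simpa [pvCnt, h, pvT] using hcur
    · have := ih (cur + 1 + (w.length : Int)) (by omega)
      simp only [pvCnt, if_neg h, List.map_cons, pvT]
      push_cast at this ⊢
      omega

theorem pvCnt_stop (mx : Int) (ws : List (List Char)) : ∀ cur,
    pvCnt mx ws cur < ws.length →
    mx < cur + (pvT (ws.map List.length) (pvCnt mx ws cur + 1) : Int) := by
  induction ws with
  | nil => intro cur h; simp [pvCnt] at h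
  | cons w t ih =>
    intro cur hlt
    by_cases h : cur + (w.length : Int) + 1 > mx
    · simp only [pvCnt, if_pos h, List.map_cons, pvT, pvT_zero]
      push_cast
      omega
    · simp only [pvCnt, if_neg h, List.length_cons] at hlt
      have := ih (cur + 1 + (w.length : Int)) (by omega)
      simp only [pvCnt, if_neg h, List.map_cons, pvT]
      push_cast at this ⊢
      omega

theorem pvK_le (mx : Int) (ws : List (List Char)) : pvK mx ws ≤ ws.length := by
  cases ws with
  | nil => simp [pvK]
  | cons w t =>
    by_cases h : (w.length : Int) > mx
    · simp [pvK, h]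
    · simp only [pvK, if_neg h, List.length_cons]
      have := pvCnt_le mx t (w.length : Int)
      omega

theorem pvK_fit (mx : Int) (ws : List (List Char)) :
    pvK mx ws = 0 ∨ (pvT (ws.map List.length) (pvK mx ws) : Int) ≤ mx + 1 := by
  cases ws with
  | nil => left; rfl
  | cons w t =>
    by_cases h : (w.length : Int) > mx
    · left; simp [pvK, h]
    · right
      have := pvCnt_fit mx t (w.length : Int) (by omega)
      simp only [pvK, if_neg h, List.map_cons, pvT]
      push_cast at this ⊢
      omega

theorem pvK_stop (mx : Int) (ws : List (List Char)) :
    pvK mx ws = ws.length ∨ mx + 1 < (pvT (ws.map List.length) (pvK mx ws + 1) : Int) := by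
  cases ws with
  | nil => left; rfl
  | cons w t =>
    by_cases h : (w.length : Int) > mx
    · right; simp only [pvK, if_pos h, List.map_cons, pvT]; push_cast; omega
    · by_cases hl : pvCnt mx t (w.length : Int) < t.length
      · right
        have := pvCnt_stop mx t (w.length : Int) hl
        simp only [pvK, if_neg h, List.map_cons, pvT]
        push_cast at this ⊢
        omega
      · left
        have := pvCnt_le mx t (w.length : Int)
        simp only [pvK, if_neg h, List.length_cons]
        omega

-- ---- split₀ facts ----

theorem pvGo_acc (s : List Char) : ∀ (cur : List Char) (acc : List (List Char)),
    PySem.Chars.split₀.go s cur acc = acc.reverse ++ PySem.Chars.split₀.go s cur [] := by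
  induction s with
  | nil =>
    intro cur acc
    by_cases h : cur.isEmpty <;> simp [PySem.Chars.split₀.go, h]
  | cons c rest ih =>
    intro cur acc
    by_cases hs : PySem.Chars.isspace c
    · by_cases hc : cur.isEmpty
      · simp only [PySem.Chars.split₀.go, hs, hc, if_true]
        exact ih [] acc
      · simp only [PySem.Chars.split₀.go, hs, hc, if_true, Bool.false_eq_true, if_false]
        rw [ih [] (cur.reverse :: acc), ih [] [cur.reverse]]
        simp
    · simp only [PySem.Chars.split₀.go, hs, Bool.false_eq_true, if_false]
      exact ih (c :: cur) acc

theorem pvGo_nospace (w : List Char) (h : ∀ c ∈ w, PySem.Chars.isspace c = false) :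
    ∀ (t cur : List Char) (acc : List (List Char)),
    PySem.Chars.split₀.go (w ++ t) cur acc = PySem.Chars.split₀.go t (w.reverse ++ cur) acc := by
  induction w with
  | nil => intro t cur acc; simp
  | cons c w' ih =>
    intro t cur acc
    have hc := h c (by simp)
    have h' : ∀ c ∈ w', PySem.Chars.isspace c = false := fun x hx => h x (by simp [hx])
    simp only [List.cons_append, PySem.Chars.split₀.go, hc, Bool.false_eq_true, if_false]
    rw [ih h' t (c :: cur) acc]
    simp

theorem pvSplit_word (w : List Char) (hne : w ≠ [])
    (h : ∀ c ∈ w, PySem.Chars.isspace c = false) : PySem.Chars.split₀ w = [w] := by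
  have hgo := pvGo_nospace w h [] [] []
  simp only [List.append_nil] at hgo
  unfold PySem.Chars.split₀
  rw [hgo]
  have hE : (w.reverse ++ []).isEmpty = false := by simpa [List.isEmpty_iff] using hne
  simp [PySem.Chars.split₀.go, hne]

theorem pvSplit_word_cons (w rest : List Char) (hne : w ≠ [])
    (h : ∀ c ∈ w, PySem.Chars.isspace c = false) :
    PySem.Chars.split₀ (w ++ ' ' :: rest) = w :: PySem.Chars.split₀ rest := by
  unfold PySem.Chars.split₀
  rw [pvGo_nospace w h (' ' :: rest) [] []]
  have hsp : PySem.Chars.isspace ' ' = true := by decide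
  have hE : (w.reverse ++ []).isEmpty = false := by simpa [List.isEmpty_iff] using hne
  simp only [PySem.Chars.split₀.go, hsp, if_true, List.append_nil, List.reverse_reverse]
  rw [pvGo_acc rest [] [w]]
  simp [hne]

theorem pvSplit_join (ws : List (List Char))
    (h : ∀ w ∈ ws, w ≠ [] ∧ ∀ c ∈ w, PySem.Chars.isspace c = false) :
    PySem.Chars.split₀ (PySem.Chars.join [' '] ws) = ws := by
  induction ws with
  | nil => rfl
  | cons w t ih =>
    cases t with
    | nil =>
      have hw := h w (by simp)
      rw [PySem.Chars.join_singleton]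
      exact pvSplit_word w hw.1 hw.2
    | cons x t' =>
      have hw := h w (by simp)
      rw [PySem.Chars.join_cons_cons]
      have : w ++ [' '] ++ PySem.Chars.join [' '] (x :: t')
          = w ++ ' ' :: PySem.Chars.join [' '] (x :: t') := by simp
      rw [this, pvSplit_word_cons w _ hw.1 hw.2, ih (fun y hy => h y (by simp [hy]))]

theorem pvGo_prop (s : List Char) : ∀ (cur : List Char) (acc : List (List Char)),
    (∀ w ∈ acc, w ≠ [] ∧ ∀ c ∈ w, PySem.Chars.isspace c = false) →
    (∀ c ∈ cur, PySem.Chars.isspace c = false) →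
    ∀ w ∈ PySem.Chars.split₀.go s cur acc,
      w ≠ [] ∧ ∀ c ∈ w, PySem.Chars.isspace c = false := by
  induction s with
  | nil =>
    intro cur acc hacc hcur w hw
    by_cases h : cur.isEmpty
    · simp only [PySem.Chars.split₀.go, h, if_true, List.mem_reverse] at hw
      exact hacc w hw
    · simp only [PySem.Chars.split₀.go, h, Bool.false_eq_true, if_false,
        List.mem_reverse, List.mem_cons] at hw
      rcases hw with hw | hw
      · subst hw
        refine ⟨by simpa [List.isEmpty_iff] using h, fun c hc => hcur c (by simpa using hc)⟩
      · exact hacc w hw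
  | cons c rest ih =>
    intro cur acc hacc hcur w hw
    by_cases hs : PySem.Chars.isspace c
    · by_cases hc : cur.isEmpty
      · simp only [PySem.Chars.split₀.go, hs, hc, if_true] at hw
        exact ih [] acc hacc (by simp) w hw
      · simp only [PySem.Chars.split₀.go, hs, hc, if_true, Bool.false_eq_true, if_false] at hw
        refine ih [] (cur.reverse :: acc) ?_ (by simp) w hw
        intro y hy
        rcases List.mem_cons.mp hy with hy | hy
        · subst hy
          refine ⟨by simpa [List.isEmpty_iff] using hc, fun d hd => hcur d (by simpa using hd)⟩
        · exact hacc y hy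
    · simp only [PySem.Chars.split₀.go, hs, Bool.false_eq_true, if_false] at hw
      refine ih (c :: cur) acc hacc ?_ w hw
      intro d hd
      rcases List.mem_cons.mp hd with hd | hd
      · subst hd; simpa using hs
      · exact hcur d hd

theorem pvSplit_words_prop (s : List Char) :
    ∀ w ∈ PySem.Chars.split₀ s, w ≠ [] ∧ ∀ c ∈ w, PySem.Chars.isspace c = false := by
  intro w hw
  exact pvGo_prop s [] [] (by simp) (by simp) w hw

-- ---- B's cum list ----

theorem pvCum_fold_ne (ws : List (List Char)) : ∀ (c0 : List Int) (t0 : Int), c0 ≠ [] →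
    ws.foldl (fun (st : List Int × Int) w =>
      (st.1 ++ [st.2 + (w.length : Int) + (if st.1.isEmpty then 0 else 1)],
       st.2 + (w.length : Int) + (if st.1.isEmpty then 0 else 1))) (c0, t0)
    = (c0 ++ (List.range ws.length).map
        (fun i => t0 + (pvT (ws.map List.length) (i + 1) : Int)),
       t0 + (pvT (ws.map List.length) ws.length : Int)) := by
  induction ws with
  | nil => intro c0 t0 _; simp [pvT_nil]
  | cons w t ih =>
    intro c0 t0 hc0
    have hE : c0.isEmpty = false := by simpa [List.isEmpty_iff] using hc0
    simp only [List.foldl_cons, hE, Bool.false_eq_true, if_false]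
    rw [ih (c0 ++ [t0 + (w.length : Int) + 1]) (t0 + (w.length : Int) + 1) (by simp)]
    rw [Prod.mk.injEq]
    refine ⟨?_, ?_⟩
    · rw [List.length_cons, List.range_succ_eq_map]
      simp only [List.map_cons, List.map_map, pvT, pvT_zero, List.append_assoc,
        List.singleton_append]
      apply congrArg
      rw [List.cons.injEq]
      refine ⟨by push_cast; ring, ?_⟩
      apply List.map_congr_left
      intro i _
      simp only [Function.comp_apply, pvT]
      push_cast
      ring
    · simp only [List.map_cons, List.length_cons, pvT]
      push_cast
      ring

theorem pvCum_eq (ws : List (List Char)) :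
    (ws.foldl (fun (st : List Int × Int) w =>
      (st.1 ++ [st.2 + (w.length : Int) + (if st.1.isEmpty then 0 else 1)],
       st.2 + (w.length : Int) + (if st.1.isEmpty then 0 else 1))) ([], 0)).1
    = (List.range ws.length).map (fun i => (pvT (ws.map List.length) (i + 1) : Int) - 1) := by
  cases ws with
  | nil => rfl
  | cons w t =>
    simp only [List.foldl_cons, List.isEmpty_nil, if_true, List.nil_append]
    rw [pvCum_fold_ne t [0 + (w.length : Int) + 0] (0 + (w.length : Int) + 0) (by simp)]
    simp only [List.length_cons, List.range_succ_eq_map, List.map_cons, List.map_map,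
      List.singleton_append, List.cons.injEq]
    refine ⟨by simp [pvT, pvT_zero], ?_⟩
    apply List.map_congr_left
    intro i _
    simp only [Function.comp_apply, pvT]
    push_cast
    ring

-- ---- binary search returns the unique greedy count ----

theorem pvBSearch_eq (L : List Nat) (mx : Int) (K : Nat)
    (hK1 : K ≤ L.length)
    (hK2 : K = 0 ∨ (pvT L K : Int) ≤ mx + 1)
    (hK3 : K = L.length ∨ mx + 1 < (pvT L (K + 1) : Int)) :
    ∀ lo hi : Int, 0 ≤ lo → lo ≤ hi → hi ≤ (L.length : Int) →
    (lo = 0 ∨ (pvT L lo.toNat : Int) ≤ mx + 1) → (K : Int) ≤ hi →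
    pvBSearch ((List.range L.length).map (fun i => (pvT L (i + 1) : Int) - 1)) mx lo hi
      = (K : Int) := by
  intro lo hi h0 hlohi hhi hfit hKhi
  by_cases h : lo < hi
  · have hmid := PySem.Int.floordiv_two_mid_bounds (lo := lo + 1) (hi := hi) (by omega)
    have e : lo + 1 + hi = lo + hi + 1 := by ring
    rw [e] at hmid
    set mid := PySem.Int.floordiv (lo + hi + 1) 2 with hmiddef
    have hmid1 : lo + 1 ≤ mid := hmid.1
    have hmid2 : mid ≤ hi := hmid.2
    have hinr : ((List.range L.length).map (fun i => (pvT L (i + 1) : Int) - 1)).length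
        = L.length := by simp
    have hidx : PySem.List.pyGetD
        ((List.range L.length).map (fun i => (pvT L (i + 1) : Int) - 1)) (mid - 1) 0
        = (pvT L mid.toNat : Int) - 1 := by
      rw [PySem.List.pyGetD_eq_getElem _ 0 (by omega) (by simp; omega)]
      simp only [List.getElem_map, List.getElem_range]
      have e2 : (mid - 1).toNat + 1 = mid.toNat := by omega
      rw [e2]
    rw [pvBSearch, if_pos h]
    show (if PySem.List.pyGetD ((List.range L.length).map
          (fun i => (pvT L (i + 1) : Int) - 1)) (mid - 1) 0 ≤ mx then
        pvBSearch ((List.range L.length).map (fun i => (pvT L (i + 1) : Int) - 1)) mx mid hi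
      else
        pvBSearch ((List.range L.length).map (fun i => (pvT L (i + 1) : Int) - 1)) mx lo
          (mid - 1)) = (K : Int)
    rw [hidx]
    by_cases hcond : (pvT L mid.toNat : Int) - 1 ≤ mx
    · rw [if_pos hcond]
      exact pvBSearch_eq L mx K hK1 hK2 hK3 mid hi (by omega) (by omega) hhi
        (Or.inr (by omega)) hKhi
    · rw [if_neg hcond]
      have hKmid : (K : Int) ≤ mid - 1 := by
        by_contra hcon
        have hKge : mid ≤ (K : Int) := by omega
        have : (pvT L mid.toNat : Int) ≤ (pvT L K : Int) := by
          exact_mod_cast pvT_mono L mid.toNat K (by omega)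
        rcases hK2 with h2 | h2
        · omega
        · omega
      exact pvBSearch_eq L mx K hK1 hK2 hK3 lo (mid - 1) h0 (by omega) (by omega) hfit hKmid
  · rw [pvBSearch, if_neg h]
    have hlo : lo = hi := by omega
    -- lo = hi; show lo = K
    by_contra hne
    have hlt : (K : Int) < lo := by
      rcases lt_or_ge (K : Int) lo with h' | h'
      · exact h'
      · omega
    rcases hK3 with h3 | h3
    · omega
    · have hfit' : (pvT L lo.toNat : Int) ≤ mx + 1 := by
        rcases hfit with h' | h'
        · omega
        · exact h'
      have : (pvT L (K + 1) : Int) ≤ (pvT L lo.toNat : Int) := by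
        exact_mod_cast pvT_mono L (K + 1) lo.toNat (by omega)
      omega
termination_by lo hi => (hi - lo).toNat
decreasing_by
  · omega
  · omega

-- the value A computes: the join of the greedy prefix
theorem pvA_eq_join (s : List Char) (mn mx : Int) :
    (if ((pvALoop1 mx (PySem.Chars.split₀ s) []).length : Int) < mn ∧
        (PySem.Chars.split₀ (pvALoop1 mx (PySem.Chars.split₀ s) [])).length
          < (PySem.Chars.split₀ s).length then
      pvALoop2 mx ((PySem.Chars.split₀ s).drop
        (PySem.Chars.split₀ (pvALoop1 mx (PySem.Chars.split₀ s) [])).length)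
        (pvALoop1 mx (PySem.Chars.split₀ s) [])
    else pvALoop1 mx (PySem.Chars.split₀ s) [])
    = PySem.Chars.join [' '] ((PySem.Chars.split₀ s).take (pvK mx (PySem.Chars.split₀ s))) := by
  have hprop := pvSplit_words_prop s
  set ws := PySem.Chars.split₀ s with hws
  clear_value ws
  clear hws
  cases ws with
  | nil => simp [pvALoop1, pvK, PySem.Chars.join, List.intercalate]
  | cons w t =>
    have hw := hprop w (by simp)
    by_cases hbig : (w.length : Int) > mx
    · -- the first word does not fit: the result stays empty, both loops refuse everything
      have h1 : pvALoop1 mx (w :: t) [] = [] := by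
        simp only [pvALoop1, List.isEmpty_nil, if_true, List.length_nil]
        rw [if_pos (by push_cast; omega)]
      rw [h1]
      have hK : pvK mx (w :: t) = 0 := by simp [pvK, hbig]
      rw [hK]
      have hsplitnil : PySem.Chars.split₀ ([] : List Char) = [] := rfl
      rw [hsplitnil]
      simp only [List.length_nil, List.take_zero, Nat.cast_zero, List.drop_zero]
      by_cases hcond : ((0 : Int) < mn ∧ 0 < (w :: t).length)
      · rw [if_pos hcond, pvALoop2_eq]
        have hcnt : pvCnt mx (w :: t) ((([] : List Char).length : Int)) = 0 := by
          simp only [pvCnt, List.length_nil, Nat.cast_zero]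
          rw [if_pos (by omega)]
        rw [hcnt]
        simp [pvFlat_nil, PySem.Chars.join, List.intercalate]
      · rw [if_neg hcond]
        simp [PySem.Chars.join, List.intercalate]
    · -- the first word fits
      set g := pvCnt mx t (w.length : Int) with hg
      have hK : pvK mx (w :: t) = g + 1 := by
        simp only [pvK, if_neg hbig]
        rw [hg]
      have h1 : pvALoop1 mx (w :: t) [] = w ++ pvFlat (t.take g) := by
        simp only [pvALoop1, List.isEmpty_nil, if_true, List.length_nil, Nat.cast_zero]
        rw [if_neg (by omega)]
        simp only [List.nil_append]
        rw [pvALoop1_eq mx t w hw.1, ← hg]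
      have hjoin : PySem.Chars.join [' '] ((w :: t).take (g + 1)) = w ++ pvFlat (t.take g) := by
        rw [List.take_succ_cons, pvJoin_cons]
      rw [hK, h1]
      have htakeprop : ∀ y ∈ (w :: t).take (g + 1), y ≠ [] ∧
          ∀ c ∈ y, PySem.Chars.isspace c = false :=
        fun y hy => hprop y (List.mem_of_mem_take hy)
      have hsplitback : PySem.Chars.split₀ (w ++ pvFlat (t.take g)) = (w :: t).take (g + 1) := by
        rw [← hjoin]
        exact pvSplit_join _ htakeprop
      rw [hsplitback]
      have hgle : g ≤ t.length := by rw [hg]; exact pvCnt_le mx t _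
      have hlen : ((w :: t).take (g + 1)).length = g + 1 := by simp; omega
      rw [hlen]
      by_cases hcond : (((w ++ pvFlat (t.take g)).length : Int) < mn ∧ g + 1 < (w :: t).length)
      · rw [if_pos hcond]
        -- the second loop adds nothing: the next word still does not fit
        have hgt : g < t.length := by
          have := hcond.2
          simp at this
          omega
        have hdrop : (w :: t).drop (g + 1) = (w :: t)[g + 1] :: (w :: t).drop (g + 2) := by
          apply List.drop_eq_getElem_cons
        have hstop := pvK_stop mx (w :: t)
        rw [hK] at hstop
        have hstop' : mx + 1 < (pvT ((w :: t).map List.length) (g + 2) : Int) := by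
          rcases hstop with h' | h'
          · exfalso
            simp only [List.length_cons] at h'
            omega
          · exact h'
        have hsucc : pvT ((w :: t).map List.length) (g + 2)
            = pvT ((w :: t).map List.length) (g + 1)
              + (((w :: t).map List.length)[g + 1]'(by simpa using Nat.succ_lt_succ hgt)) + 1 := by
          apply pvT_succ
        have hlenres : (w ++ pvFlat (t.take g)).length
            = w.length + pvT (t.map List.length) g := by
          simp [pvFlat_take_length]
        have hT1 : pvT ((w :: t).map List.length) (g + 1)
            = w.length + 1 + pvT (t.map List.length) g := by
          simp [pvT]
        have hgetlen : ((w :: t).map List.length)[g + 1]'(by simpa using Nat.succ_lt_succ hgt)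
            = ((w :: t)[g + 1]'(by simpa using Nat.succ_lt_succ hgt)).length := by
          simp
        rw [hdrop, pvALoop2_eq]
        have hcnt0 : pvCnt mx ((w :: t)[g + 1] :: (w :: t).drop (g + 2))
            (((w ++ pvFlat (t.take g)).length : Int)) = 0 := by
          simp only [pvCnt]
          rw [if_pos ?_]
          rw [hlenres]
          push_cast
          rw [hsucc, hgetlen] at hstop'
          rw [hT1] at hstop'
          push_cast at hstop'
          omega
        rw [hcnt0]
        simp only [List.take_zero, pvFlat_nil, List.append_nil]
        exact hjoin.symm
      · rw [if_neg hcond]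
        exact hjoin.symm

-- ===== VERDICT (by name: the statement is the Claim_ definition above) =====
theorem trim_product_name_spec : Claim_equal_trim_product_name := by
  unfold Claim_equal_trim_product_name
  intro s mn mx _
  unfold Spec_trim_product_name trim_product_name trim_product_name_alt
  show String.mk
      (if ((pvALoop1 mx (PySem.Chars.split₀ s.toList) []).length : Int) < mn ∧
          (PySem.Chars.split₀ (pvALoop1 mx (PySem.Chars.split₀ s.toList) [])).length
            < (PySem.Chars.split₀ s.toList).length then
        pvALoop2 mx ((PySem.Chars.split₀ s.toList).drop
          (PySem.Chars.split₀ (pvALoop1 mx (PySem.Chars.split₀ s.toList) [])).length)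
          (pvALoop1 mx (PySem.Chars.split₀ s.toList) [])
      else pvALoop1 mx (PySem.Chars.split₀ s.toList) [])
    = String.mk (PySem.Chars.join [' '] ((PySem.Chars.split₀ s.toList).take
        (pvBSearch ((PySem.Chars.split₀ s.toList).foldl
            (fun (st : List Int × Int) w =>
              (st.1 ++ [st.2 + (w.length : Int) + (if st.1.isEmpty then 0 else 1)],
               st.2 + (w.length : Int) + (if st.1.isEmpty then 0 else 1))) ([], 0)).1
          mx 0 ((PySem.Chars.split₀ s.toList).length : Int)).toNat))
  apply congrArg
  rw [pvA_eq_join s.toList mn mx]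
  rw [pvCum_eq]
  set ws := PySem.Chars.split₀ s.toList with hws
  have hLL : (ws.map List.length).length = ws.length := List.length_map ..
  rw [← hLL]
  rw [pvBSearch_eq (ws.map List.length) mx (pvK mx ws)
      (by rw [List.length_map]; exact pvK_le mx ws)
      (pvK_fit mx ws)
      (by rw [List.length_map]; exact pvK_stop mx ws)
      0 ((ws.map List.length).length : Int) le_rfl
      (by exact_mod_cast Nat.zero_le _) le_rfl (Or.inl rfl)
      (by exact_mod_cast (by rw [List.length_map]; exact pvK_le mx ws :
            pvK mx ws ≤ (ws.map List.length).length))]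
  rw [Int.toNat_natCast]
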